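-- pv_equiv track=rewrite | github.com/maurergroup/deltascf-aims | deltascf_aims/utils/checks_utils.py | check_spin_polarised
-- ===== SOURCE A (Python) =====
-- def check_spin_polarised(lines: list[str]) -> bool:
--     """
--     Check if the FHI-aims calculation was spin polarised.
--
--     Parameters
--     ----------
--     lines : list[str]
--         Lines from the aims.out file
--
--     Returns
--     -------
--     bool
--         Whether the calculation was spin polarised or not
--     """
--     spin_polarised = False
--
--     for line in lines:
--         spl = line.split()
--         if len(spl) == 2:
--             # Don't break the loop if spin polarised calculation is found as if the
--             # keyword is specified again, it is the last one that is used
--             if spl[0] == "spin" and spl[1] == "collinear":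
--                 spin_polarised = True
--
--             if spl[0] == "spin" and spl[1] == "none":
--                 spin_polarised = False
--
--     return spin_polarised
-- ===== SOURCE B (Python) =====
-- def check_spin_polarised(lines: list[str]) -> bool:
--     """Backward scan: the last effective 'spin' keyword wins, so return on first match from the end."""
--     for line in reversed(lines):
--         spl = line.split()
--         if spl == ["spin", "collinear"]:
--             return True
--         if spl == ["spin", "none"]:
--             return False
--     return False
-- ===== Notes on version B (the rewrite author's own statement) =====
-- stated objective: alternative
-- what changed: B scans the lines backwards and returns immediately on the first 'spin collinear'/'spin none' line instead of sweeping forward while overwriting a flag.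
import Mathlib
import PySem

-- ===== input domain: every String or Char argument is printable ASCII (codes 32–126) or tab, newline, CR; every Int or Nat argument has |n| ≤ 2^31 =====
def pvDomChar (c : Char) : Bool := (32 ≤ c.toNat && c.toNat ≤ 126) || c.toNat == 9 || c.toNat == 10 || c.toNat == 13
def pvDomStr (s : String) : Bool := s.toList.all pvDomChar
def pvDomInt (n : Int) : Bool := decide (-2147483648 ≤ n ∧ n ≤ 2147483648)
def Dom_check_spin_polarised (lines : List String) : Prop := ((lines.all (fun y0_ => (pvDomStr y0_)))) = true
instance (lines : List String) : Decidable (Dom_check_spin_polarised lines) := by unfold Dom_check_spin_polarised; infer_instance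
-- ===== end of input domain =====

-- B scans backwards, returning on the first effective 'spin' keyword line; same result, no flag.

-- ===== PORT A =====
-- forward sweep over the lines, overwriting a flag (literal transliteration of A)
def check_spin_polarised (lines : List String) : Bool :=
  lines.foldl (fun spin_polarised line =>
    let spl := PySem.Str.split₀ line
    if spl.length = 2 then
      let spin_polarised :=
        if PySem.List.pyGet? spl 0 = some "spin" ∧ PySem.List.pyGet? spl 1 = some "collinear" then true
        else spin_polarised
      if PySem.List.pyGet? spl 0 = some "spin" ∧ PySem.List.pyGet? spl 1 = some "none" then false
      else spin_polarised
    else spin_polarised) false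

-- ===== PORT B =====
-- backward scan with early return (literal transliteration of B's reversed-loop)
def check_spin_polarised_altGo : List String → Bool
  | [] => false
  | line :: rest =>
    let spl := PySem.Str.split₀ line
    if spl = ["spin", "collinear"] then true
    else if spl = ["spin", "none"] then false
    else check_spin_polarised_altGo rest

def check_spin_polarised_alt (lines : List String) : Bool :=
  check_spin_polarised_altGo lines.reverse

-- ===== PRECONDITION & SPEC =====
def Spec_check_spin_polarised (lines : List String) (out : Bool) : Prop := out = check_spin_polarised_alt lines
instance (lines : List String) (out : Bool) : Decidable (Spec_check_spin_polarised lines out) := by unfold Spec_check_spin_polarised; infer_instance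

-- ===== CLAIM (what is proved, stated in full; the proofs are below) =====
def Claim_equal_check_spin_polarised : Prop := ∀ (lines : List String), Dom_check_spin_polarised lines → Spec_check_spin_polarised lines (check_spin_polarised lines)

-- ===== LEMMAS AND PROOFS =====

-- A's step function, named for the proofs
def pvStepA (spin_polarised : Bool) (line : String) : Bool :=
  let spl := PySem.Str.split₀ line
  if spl.length = 2 then
    let spin_polarised :=
      if PySem.List.pyGet? spl 0 = some "spin" ∧ PySem.List.pyGet? spl 1 = some "collinear" then true
      else spin_polarised
    if PySem.List.pyGet? spl 0 = some "spin" ∧ PySem.List.pyGet? spl 1 = some "none" then false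
    else spin_polarised
  else spin_polarised

-- a line "is a keyword line" iff its split is one of the two recognised forms
def pvKey (line : String) : Bool :=
  PySem.Str.split₀ line = ["spin", "collinear"] || PySem.Str.split₀ line = ["spin", "none"]

theorem pvStepA_eq (acc : Bool) (line : String) :
    pvStepA acc line =
      (if PySem.Str.split₀ line = ["spin", "collinear"] then true
       else if PySem.Str.split₀ line = ["spin", "none"] then false
       else acc) := by
  unfold pvStepA
  cases h : PySem.Str.split₀ line with
  | nil => simp
  | cons a t =>
    cases t with
    | nil => simp
    | cons b t2 =>
      cases t2 with
      | nil =>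
        simp only [List.length_cons, List.length_nil, PySem.List.pyGet?]
        by_cases h1 : a = "spin" <;> by_cases h2 : b = "collinear" <;>
          by_cases h3 : b = "none" <;> simp_all [PySem.List.pyIdx?]
      | cons c t3 => simp

theorem pv_main (lines : List String) (acc : Bool) :
    lines.foldl pvStepA acc =
      if lines.any pvKey then check_spin_polarised_altGo lines.reverse else acc := by
  induction lines using List.reverseRecOn generalizing acc with
  | nil => simp
  | append_singleton l x ih =>
    rw [List.foldl_append, List.foldl_cons, List.foldl_nil, ih, List.reverse_append]
    simp only [List.reverse_singleton, List.singleton_append, check_spin_polarised_altGo,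
      List.any_append, List.any_cons, List.any_nil]
    rw [pvStepA_eq]
    by_cases h1 : PySem.Str.split₀ x = ["spin", "collinear"] <;>
      by_cases h2 : PySem.Str.split₀ x = ["spin", "none"] <;>
        simp [h1, h2, pvKey]

theorem pvGo_false_of_no_key (lines : List String) (h : lines.any pvKey = false) :
    check_spin_polarised_altGo lines.reverse = false := by
  induction lines using List.reverseRecOn with
  | nil => rfl
  | append_singleton l x ih =>
    simp only [List.any_append, List.any_cons, List.any_nil, Bool.or_eq_false_iff] at h
    rw [List.reverse_append]
    simp only [List.reverse_singleton, List.singleton_append, check_spin_polarised_altGo]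
    obtain ⟨hl, hx⟩ := h
    simp only [pvKey, Bool.or_eq_false_iff, decide_eq_false_iff_not] at hx
    rw [if_neg hx.1.1, if_neg hx.1.2]
    exact ih hl

-- ===== VERDICT (by name: the statement is the Claim_ definition above) =====
theorem check_spin_polarised_spec : Claim_equal_check_spin_polarised := by
  intro lines _
  unfold Spec_check_spin_polarised check_spin_polarised check_spin_polarised_alt
  show lines.foldl pvStepA false = _
  rw [pv_main]
  cases h : lines.any pvKey
  · simp [pvGo_false_of_no_key lines h]
  · simp
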